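-- pv_equiv track=rewrite | github.com/seoul-ssafy-class-2-studyclub/Eunsung | D3/4843 특별한 정렬.py | find_5
-- ===== SOURCE A (Python) =====
-- def find_5(arr, min_result_list, max_result_list):
--     min_num = arr[0]
--     max_num = arr[0]
--     max_index = 0
--     min_index = 0
--     for i in range(1, len(arr)):
--         if min_num > arr[i]:
--             min_num = arr[i]
--             min_index = i
--         if max_num < arr[i]:
--             max_num = arr[i]
--             max_index = i
--
--     arr.remove(max_num)
--     arr.remove(min_num)
--
--     min_result_list.append(min_num)
--     max_result_list.append(max_num)
--
--     if len(min_result_list) == 5: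
--         return min_result_list, max_result_list
--     return find_5(arr, min_result_list, max_result_list)
-- ===== SOURCE B (Python) =====
-- def find_5(arr, min_result_list, max_result_list):
--     # Iterative rewrite: guard-first while loop with builtin min/max (mutates arr like A).
--     while len(min_result_list) < 5:
--         lo, hi = min(arr), max(arr)
--         arr.remove(hi)
--         arr.remove(lo)
--         min_result_list.append(lo)
--         max_result_list.append(hi)
--     return min_result_list, max_result_list
-- ===== Notes on version B (the rewrite author's own statement) =====
-- stated objective: idiomatic
-- what changed: Replaces the bounded recursion with check-after-append and the hand-written index-tracking min/max scan by a guard-first while loop using the builtin min and max, with no index bookkeeping.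
import Mathlib
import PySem

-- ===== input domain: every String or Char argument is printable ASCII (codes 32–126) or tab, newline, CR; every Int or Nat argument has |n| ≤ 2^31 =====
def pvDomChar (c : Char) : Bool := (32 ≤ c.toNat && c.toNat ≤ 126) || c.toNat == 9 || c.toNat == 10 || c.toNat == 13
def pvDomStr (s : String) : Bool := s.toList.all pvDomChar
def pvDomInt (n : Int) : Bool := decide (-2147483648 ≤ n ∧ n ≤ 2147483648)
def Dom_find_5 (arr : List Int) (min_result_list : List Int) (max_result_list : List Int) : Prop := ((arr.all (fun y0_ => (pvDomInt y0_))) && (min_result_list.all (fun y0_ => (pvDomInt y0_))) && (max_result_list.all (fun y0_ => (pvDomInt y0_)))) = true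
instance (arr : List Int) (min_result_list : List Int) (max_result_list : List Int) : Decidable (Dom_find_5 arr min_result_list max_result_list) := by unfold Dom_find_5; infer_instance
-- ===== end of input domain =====

-- B replaces A's check-after-append recursion and hand-written index-tracking scan by a
-- guard-first while loop using builtin min/max (B performs the same in-place mutations as A).

-- ===== PORT A =====
-- termination helper for the port's recursion (each round removes two elements)
theorem pv_remove?_length_lt {α : Type} [BEq α] [LawfulBEq α] {xs ys : List α} {v : α}
    (h : PySem.List.remove? xs v = some ys) : ys.length < xs.length := by
  have hv : v ∈ xs := by
    by_contra hv
    rw [(PySem.List.remove?_eq_none_iff xs v).mpr hv] at h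
    simp at h
  rw [PySem.List.remove?_eq_some_erase xs v hv] at h
  cases h
  rw [List.length_erase_of_mem hv]
  exact Nat.sub_lt (List.length_pos_of_mem hv) one_pos

def find_5 (arr : List Int) (min_result_list : List Int) (max_result_list : List Int) : List Int × List Int :=
  match harr : arr with
  | [] => ([], [])  -- arr[0]: IndexError (outside Pre_)
  | a0 :: _ =>
    -- state (min_num, min_index, max_num, max_index); the loop over range(1, len(arr))
    let st := (PySem.List.pyRange 1 (arr.length : Int) 1).foldl
      (fun (st : Int × Int × Int × Int) (i : Int) =>
        let v := PySem.List.pyGetD arr i 0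
        let st1 := if st.1 > v then (v, i, st.2.2.1, st.2.2.2) else st
        if st1.2.2.1 < v then (st1.1, st1.2.1, v, i) else st1)
      (a0, 0, a0, 0)
    let min_num := st.1
    let max_num := st.2.2.1
    match h1 : PySem.List.remove? arr max_num with
    | none => ([], [])  -- ValueError (outside Pre_)
    | some arr1 =>
      match h2 : PySem.List.remove? arr1 min_num with
      | none => ([], [])  -- ValueError (outside Pre_)
      | some arr2 =>
        let mn' := min_result_list ++ [min_num]
        let mx' := max_result_list ++ [max_num]
        if mn'.length == 5 then (mn', mx')
        else find_5 arr2 mn' mx'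
termination_by arr.length
decreasing_by
  subst harr
  exact Nat.lt_trans (pv_remove?_length_lt h2) (pv_remove?_length_lt h1)

-- ===== PORT B =====
def find_5_alt (arr : List Int) (min_result_list : List Int) (max_result_list : List Int) : List Int × List Int :=
  if min_result_list.length < 5 then
    match PySem.List.min? arr (fun y => y), PySem.List.max? arr (fun y => y) with
    | some lo, some hi =>
      (match h1 : PySem.List.remove? arr hi with
       | none => ([], [])  -- ValueError (outside Pre_)
       | some arr1 =>
         match h2 : PySem.List.remove? arr1 lo with
         | none => ([], [])  -- ValueError (outside Pre_)
         | some arr2 =>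
           find_5_alt arr2 (min_result_list ++ [lo]) (max_result_list ++ [hi]))
    | _, _ => ([], [])  -- min()/max() of empty arr: ValueError (outside Pre_)
  else (min_result_list, max_result_list)
termination_by arr.length
decreasing_by
  exact Nat.lt_trans (pv_remove?_length_lt h2) (pv_remove?_length_lt h1)

-- ===== PRECONDITION & SPEC =====
-- exactly the inputs on which A returns: fewer than 5 minima collected so far, and arr long
-- enough to supply two removals per remaining round
def Pre_find_5 (arr : List Int) (min_result_list : List Int) (max_result_list : List Int) : Prop :=
  min_result_list.length < 5 ∧ 2 * (5 - min_result_list.length) ≤ arr.length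
instance (arr : List Int) (min_result_list : List Int) (max_result_list : List Int) : Decidable (Pre_find_5 arr min_result_list max_result_list) := by unfold Pre_find_5; infer_instance

def pvWitness_find_5 : List Int × List Int × List Int := ([3, 1, 4, 1, 5, 9, 2, 6, 5, 3], [], [])


def Spec_find_5 (arr : List Int) (min_result_list : List Int) (max_result_list : List Int) (out : List Int × List Int) : Prop := out = find_5_alt arr min_result_list max_result_list
instance (arr : List Int) (min_result_list : List Int) (max_result_list : List Int) (out : List Int × List Int) : Decidable (Spec_find_5 arr min_result_list max_result_list out) := by unfold Spec_find_5; infer_instance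

-- ===== CLAIM (what is proved, stated in full; the proofs are below) =====
def Claim_equal_find_5 : Prop := ∀ (arr : List Int) (min_result_list : List Int) (max_result_list : List Int), Dom_find_5 arr min_result_list max_result_list → Pre_find_5 arr min_result_list max_result_list → Spec_find_5 arr min_result_list max_result_list (find_5 arr min_result_list max_result_list)


-- ===== LEMMAS AND PROOFS =====

-- the loop body of A, uncurried over (index, value)
def pvG (st : Int × Int × Int × Int) (p : Int × Int) : Int × Int × Int × Int :=
  let v := p.2
  let st1 := if st.1 > v then (v, p.1, st.2.2.1, st.2.2.2) else st
  if st1.2.2.1 < v then (st1.1, st1.2.1, v, p.1) else st1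

theorem pvG_fst (st : Int × Int × Int × Int) (p : Int × Int) : (pvG st p).1 = min st.1 p.2 := by
  simp only [pvG]
  split_ifs <;> simp_all <;> omega

theorem pvG_max (st : Int × Int × Int × Int) (p : Int × Int) :
    (pvG st p).2.2.1 = max st.2.2.1 p.2 := by
  simp only [pvG]
  split_ifs <;> simp_all <;> omega

theorem pv_fold_proj (l : List Int) : ∀ (s : Int) (st : Int × Int × Int × Int),
    ((PySem.List.enumerate l s).foldl pvG st).1 = l.foldl min st.1 ∧
    ((PySem.List.enumerate l s).foldl pvG st).2.2.1 = l.foldl max st.2.2.1 := by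
  induction l with
  | nil => intro s st; simp [PySem.List.enumerate]
  | cons x xs ih =>
    intro s st
    rw [PySem.List.enumerate_cons]
    simp only [List.foldl_cons]
    have h := ih (s + 1) (pvG st (s, x))
    rw [pvG_fst, pvG_max] at h
    exact h

theorem pv_loop_eq (a0 : Int) (t : List Int) :
    (PySem.List.pyRange 1 (((a0 :: t).length : Int)) 1).foldl
      (fun (st : Int × Int × Int × Int) (i : Int) =>
        let v := PySem.List.pyGetD (a0 :: t) i 0
        let st1 := if st.1 > v then (v, i, st.2.2.1, st.2.2.2) else st
        if st1.2.2.1 < v then (st1.1, st1.2.1, v, i) else st1)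
      (a0, 0, a0, 0)
    = (PySem.List.enumerate t 1).foldl pvG (a0, 0, a0, 0) := by
  have hme := PySem.List.enumerate_eq_map_pyRange (a0 :: t) 0
  have h1 : PySem.List.pyRange 0 (PySem.List.len (a0 :: t)) =
      0 :: PySem.List.pyRange 1 (PySem.List.len (a0 :: t)) := by
    refine PySem.List.pyRange_one_cons ?_
    simp [PySem.List.len]
  rw [h1, List.map_cons, PySem.List.enumerate_cons, PySem.List.pyGetD_zero_cons] at hme
  have h2 : PySem.List.enumerate t (0 + 1) =
      (PySem.List.pyRange 1 (PySem.List.len (a0 :: t))).map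
        (fun j => (j, PySem.List.pyGetD (a0 :: t) j 0)) := by
    exact (List.cons.injEq _ _ _ _).mp hme |>.2
  have h3 : (0 : Int) + 1 = 1 := by omega
  rw [h3] at h2
  have h4 : PySem.List.len (a0 :: t) = (((a0 :: t).length : Int)) := by
    simp [PySem.List.len]
  rw [h4] at h2
  rw [h2, List.foldl_map]
  rfl

theorem pv_erase_append_singleton (a : Int) (x : List Int) : ((x ++ [a]).erase a).Perm x := by
  rw [List.erase_append]
  split_ifs with h
  · exact (List.perm_append_singleton a (x.erase a)).trans (List.perm_cons_erase h).symm
  · simp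

theorem pv_sorted_decomp (arr : List Int) (h2 : 2 ≤ arr.length) {m M : Int}
    (hmm : m ∈ arr) (hmin : ∀ y ∈ arr, m ≤ y) (hMm : M ∈ arr) (hmax : ∀ y ∈ arr, y ≤ M) :
    ∃ body : List Int, PySem.List.sorted arr (fun x => x) false = m :: body ++ [M] ∧
      List.Pairwise (· ≤ ·) body ∧ m ∈ arr.erase M ∧ ((arr.erase M).erase m).Perm body := by
  have hperm := PySem.List.sorted_perm arr (fun x => x) false
  have hlen := PySem.List.length_sorted arr (fun x => x) false
  have hpw := PySem.List.sorted_pairwise arr (fun x => x)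
  cases hsrt : PySem.List.sorted arr (fun x => x) false with
  | nil => rw [hsrt] at hlen; simp at hlen; omega
  | cons x rest =>
    rw [hsrt] at hperm hlen hpw
    rcases List.eq_nil_or_concat rest with hre | ⟨body, Mv, hre⟩
    · rw [hre] at hlen; simp at hlen; omega
    · rw [List.concat_eq_append] at hre
      subst hre
      -- head is the minimum
      have hxarr : x ∈ arr := hperm.subset List.mem_cons_self
      have hxle : ∀ y ∈ arr, x ≤ y := PySem.List.key_head_sorted_le arr (fun x => x) hsrt
      have hxm : x = m := le_antisymm (hxle m hmm) (hmin x hxarr)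
      subst hxm
      -- last is the maximum
      have hsplit : ∀ a ∈ x :: body, a ≤ Mv := by
        have hpw2 : List.Pairwise (fun a b => a ≤ b) ((x :: body) ++ [Mv]) := by
          simpa using hpw
        intro a ha
        exact (List.pairwise_append.mp hpw2).2.2 a ha Mv (List.mem_singleton_self Mv)
      have hMvarr : Mv ∈ arr := hperm.subset (by simp)
      have hMvM : Mv = M := by
        refine le_antisymm (hmax Mv hMvarr) ?_
        have hMs : M ∈ (x :: body) ++ [Mv] := by
          have := hperm.symm.subset hMm
          simpa using this
        rcases List.mem_append.mp hMs with h | h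
        · exact hsplit M h
        · simp at h; omega
      subst hMvM
      refine ⟨body, by simp, ?_, ?_, ?_⟩
      · have hsub : body.Sublist (x :: body ++ [Mv]) :=
          ((List.sublist_append_left body [Mv]).cons x)
        exact hpw.sublist hsub
      all_goals
        have e1 : ((x :: (body ++ [Mv])).erase Mv).Perm (x :: body) := by
          by_cases hcase : Mv = x
          · subst hcase
            rw [List.erase_cons_head]
            exact List.perm_append_singleton Mv body
          · have hne : ¬(x == Mv) = true := by
              simp
              exact fun h => hcase h.symm
            rw [List.erase_cons_tail hne]
            exact (pv_erase_append_singleton Mv body).cons x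
      all_goals
        have e2 : (arr.erase Mv).Perm (x :: body) := ((hperm.erase Mv).symm).trans e1
      · exact e2.mem_iff.mpr List.mem_cons_self
      · have e3 : ((arr.erase Mv).erase x).Perm ((x :: body).erase x) := e2.erase x
        rw [List.erase_cons_head] at e3
        exact e3

theorem pv_step (arr mn mx : List Int) (h2 : 2 ≤ arr.length) :
    ∃ (m M : Int) (body : List Int),
      PySem.List.sorted arr (fun x => x) false = m :: body ++ [M] ∧
      PySem.List.sorted ((arr.erase M).erase m) (fun x => x) false = body ∧
      body.length + 2 = arr.length ∧ ((arr.erase M).erase m).length = body.length ∧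
      find_5 arr mn mx =
        (if (mn ++ [m]).length == 5 then (mn ++ [m], mx ++ [M])
         else find_5 ((arr.erase M).erase m) (mn ++ [m]) (mx ++ [M])) := by
  match arr, h2 with
  | a0 :: t, h2 =>
  have hmin? := PySem.List.min?_id_cons a0 t
  have hmax? := PySem.List.max?_id_cons a0 t
  set m := t.foldl min a0 with hm
  set M := t.foldl max a0 with hM
  have hmm : m ∈ a0 :: t := PySem.List.min?_mem hmin?
  have hmin : ∀ y ∈ a0 :: t, m ≤ y := PySem.List.min?_isMin hmin?
  have hMm : M ∈ a0 :: t := PySem.List.max?_mem hmax?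
  have hmax : ∀ y ∈ a0 :: t, y ≤ M := PySem.List.max?_isMax hmax?
  obtain ⟨body, hsrt, hbpw, hmem1, hbperm⟩ := pv_sorted_decomp (a0 :: t) h2 hmm hmin hMm hmax
  have hsorted2 : PySem.List.sorted (((a0 :: t).erase M).erase m) (fun x => x) false = body :=
    PySem.List.sorted_id_eq_of_perm_of_pairwise _ body hbperm.symm hbpw
  have hlen2 : (((a0 :: t).erase M).erase m).length = body.length := hbperm.length_eq
  have hbl : body.length + 2 = (a0 :: t).length := by
    have := PySem.List.length_sorted (a0 :: t) (fun x => x) false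
    rw [hsrt] at this
    simp at this
    simp
    omega
  refine ⟨m, M, body, hsrt, hsorted2, hbl, hlen2, ?_⟩
  rw [find_5]
  rw [pv_loop_eq a0 t]
  rw [(pv_fold_proj t 1 (a0, 0, a0, 0)).1, (pv_fold_proj t 1 (a0, 0, a0, 0)).2]
  rw [← hm, ← hM]
  rw [PySem.List.remove?_eq_some_erase (a0 :: t) M hMm]
  split
  · rename_i heq
    exact absurd heq (by simp)
  · rename_i arr1 heq
    injection heq with heq1
    subst heq1
    rw [PySem.List.remove?_eq_some_erase ((a0 :: t).erase M) m hmem1]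

theorem pv_main (n : Nat) : ∀ (arr mn mx : List Int), mn.length + (n + 1) = 5 →
    2 * (n + 1) ≤ arr.length →
    find_5 arr mn mx =
      (mn ++ (PySem.List.sorted arr (fun x => x) false).take (n + 1),
       mx ++ ((PySem.List.sorted arr (fun x => x) false).drop
          ((PySem.List.sorted arr (fun x => x) false).length - (n + 1))).reverse) := by
  induction n with
  | zero =>
    intro arr mn mx hmn hlen
    obtain ⟨m, M, body, hsrt, hsorted2, hbl, hlen2, heq⟩ := pv_step arr mn mx (by omega)
    have h4 : mn.length = 4 := by omega
    rw [heq]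
    have hifc : ((mn ++ [m]).length == 5) = true := by simp [h4]
    rw [hifc, if_pos rfl, hsrt]
    have hL : (m :: body ++ [M]).length = body.length + 2 := by simp
    rw [hL]
    have ht : (m :: body ++ [M]).take 1 = [m] := by simp
    have hd : (m :: body ++ [M]).drop (body.length + 2 - 1) = [M] := by
      have h1 : body.length + 2 - 1 = body.length + 1 := by omega
      rw [h1]
      have h2 : m :: body ++ [M] = (m :: body) ++ [M] := by simp
      rw [h2, List.drop_append_of_le_length (by simp)]
      simp
    rw [ht, hd]
    simp
  | succ k ih =>
    intro arr mn mx hmn hlen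
    obtain ⟨m, M, body, hsrt, hsorted2, hbl, hlen2, heq⟩ := pv_step arr mn mx (by omega)
    have hkb : k + 1 ≤ body.length := by omega
    rw [heq]
    have hifc : ((mn ++ [m]).length == 5) = false := by simp; omega
    rw [hifc, if_neg (by simp)]
    rw [ih ((arr.erase M).erase m) (mn ++ [m]) (mx ++ [M]) (by simp only [List.length_append, List.length_cons, List.length_nil]; omega) (by omega)]
    rw [hsorted2, hsrt]
    have hL : (m :: body ++ [M]).length = body.length + 2 := by simp
    rw [hL]
    have ht : (m :: body ++ [M]).take (k + 1 + 1) = m :: body.take (k + 1) := by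
      have h2 : m :: body ++ [M] = (m :: body) ++ [M] := by simp
      rw [h2, List.take_append_of_le_length (by simp only [List.length_cons]; omega)]
      simp
    have hd : (m :: body ++ [M]).drop (body.length + 2 - (k + 1 + 1)) =
        body.drop (body.length - (k + 1)) ++ [M] := by
      have h2 : m :: body ++ [M] = (m :: body) ++ [M] := by simp
      have h3 : body.length + 2 - (k + 1 + 1) = (body.length - (k + 1)) + 1 := by omega
      rw [h2, h3, List.drop_append_of_le_length (by simp only [List.length_cons]; omega)]
      simp
    rw [ht, hd]
    simp

theorem pv_step_alt (arr mn mx : List Int) (h2 : 2 ≤ arr.length) (h5 : mn.length < 5) :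
    ∃ (m M : Int) (body : List Int),
      PySem.List.sorted arr (fun x => x) false = m :: body ++ [M] ∧
      PySem.List.sorted ((arr.erase M).erase m) (fun x => x) false = body ∧
      body.length + 2 = arr.length ∧ ((arr.erase M).erase m).length = body.length ∧
      find_5_alt arr mn mx = find_5_alt ((arr.erase M).erase m) (mn ++ [m]) (mx ++ [M]) := by
  match arr, h2 with
  | a0 :: t, h2 =>
  have hmin? := PySem.List.min?_id_cons a0 t
  have hmax? := PySem.List.max?_id_cons a0 t
  set m := t.foldl min a0 with hm
  set M := t.foldl max a0 with hM
  have hmm : m ∈ a0 :: t := PySem.List.min?_mem hmin?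
  have hmin : ∀ y ∈ a0 :: t, m ≤ y := PySem.List.min?_isMin hmin?
  have hMm : M ∈ a0 :: t := PySem.List.max?_mem hmax?
  have hmax : ∀ y ∈ a0 :: t, y ≤ M := PySem.List.max?_isMax hmax?
  obtain ⟨body, hsrt, hbpw, hmem1, hbperm⟩ := pv_sorted_decomp (a0 :: t) h2 hmm hmin hMm hmax
  have hsorted2 : PySem.List.sorted (((a0 :: t).erase M).erase m) (fun x => x) false = body :=
    PySem.List.sorted_id_eq_of_perm_of_pairwise _ body hbperm.symm hbpw
  have hlen2 : (((a0 :: t).erase M).erase m).length = body.length := hbperm.length_eq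
  have hbl : body.length + 2 = (a0 :: t).length := by
    have := PySem.List.length_sorted (a0 :: t) (fun x => x) false
    rw [hsrt] at this
    simp at this
    simp
    omega
  refine ⟨m, M, body, hsrt, hsorted2, hbl, hlen2, ?_⟩
  rw [find_5_alt, if_pos h5]
  simp only [hmin?, hmax?]
  rw [PySem.List.remove?_eq_some_erase (a0 :: t) M hMm]
  split
  · rename_i heq
    exact absurd heq (by simp)
  · rename_i arr1 heq
    injection heq with heq1
    subst heq1
    rw [PySem.List.remove?_eq_some_erase ((a0 :: t).erase M) m hmem1]

theorem pv_main_alt (n : Nat) : ∀ (arr mn mx : List Int), mn.length + (n + 1) = 5 →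
    2 * (n + 1) ≤ arr.length →
    find_5_alt arr mn mx =
      (mn ++ (PySem.List.sorted arr (fun x => x) false).take (n + 1),
       mx ++ ((PySem.List.sorted arr (fun x => x) false).drop
          ((PySem.List.sorted arr (fun x => x) false).length - (n + 1))).reverse) := by
  induction n with
  | zero =>
    intro arr mn mx hmn hlen
    obtain ⟨m, M, body, hsrt, hsorted2, hbl, hlen2, heq⟩ :=
      pv_step_alt arr mn mx (by omega) (by omega)
    rw [heq]
    rw [find_5_alt, if_neg (by simp; omega)]
    rw [hsrt]
    have hL : (m :: body ++ [M]).length = body.length + 2 := by simp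
    rw [hL]
    have ht : (m :: body ++ [M]).take 1 = [m] := by simp
    have hd : (m :: body ++ [M]).drop (body.length + 2 - 1) = [M] := by
      have h1 : body.length + 2 - 1 = body.length + 1 := by omega
      rw [h1]
      have h2 : m :: body ++ [M] = (m :: body) ++ [M] := by simp
      rw [h2, List.drop_append_of_le_length (by simp)]
      simp
    rw [ht, hd]
    simp
  | succ k ih =>
    intro arr mn mx hmn hlen
    obtain ⟨m, M, body, hsrt, hsorted2, hbl, hlen2, heq⟩ :=
      pv_step_alt arr mn mx (by omega) (by omega)
    have hkb : k + 1 ≤ body.length := by omega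
    rw [heq]
    rw [ih ((arr.erase M).erase m) (mn ++ [m]) (mx ++ [M]) (by simp only [List.length_append, List.length_cons, List.length_nil]; omega) (by omega)]
    rw [hsorted2, hsrt]
    have hL : (m :: body ++ [M]).length = body.length + 2 := by simp
    rw [hL]
    have ht : (m :: body ++ [M]).take (k + 1 + 1) = m :: body.take (k + 1) := by
      have h2 : m :: body ++ [M] = (m :: body) ++ [M] := by simp
      rw [h2, List.take_append_of_le_length (by simp only [List.length_cons]; omega)]
      simp
    have hd : (m :: body ++ [M]).drop (body.length + 2 - (k + 1 + 1)) =
        body.drop (body.length - (k + 1)) ++ [M] := by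
      have h2 : m :: body ++ [M] = (m :: body) ++ [M] := by simp
      have h3 : body.length + 2 - (k + 1 + 1) = (body.length - (k + 1)) + 1 := by omega
      rw [h2, h3, List.drop_append_of_le_length (by simp only [List.length_cons]; omega)]
      simp
    rw [ht, hd]
    simp

-- ===== VERDICT (by name: the statement is the Claim_ definition above) =====
theorem find_5_spec : Claim_equal_find_5 := by
  intro arr mn mx _ hpre
  obtain ⟨h5, hlen⟩ := hpre
  unfold Spec_find_5
  have hn : mn.length + ((4 - mn.length) + 1) = 5 := by omega
  have hl : 2 * ((4 - mn.length) + 1) ≤ arr.length := by omega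
  rw [pv_main (4 - mn.length) arr mn mx hn hl, pv_main_alt (4 - mn.length) arr mn mx hn hl]
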